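-- pv_equiv track=rewrite | github.com/SpellboundTutor/LM-oldProjectFiles | COS 125/Lab Exercises/Lab5/mclaughlin_lab5_code.py | SplitStringAtPunctuation
-- ===== SOURCE A (Python) =====
-- def SplitStringAtPunctuation(astring):
--     punct=".?!"
--     rtn = []
--     s = 0
--     e = 0
--     while e < len(astring):
--         if astring[e] not in punct:
--             e+=1
--         else:
--             rtn.append(astring[s:e])
--             s = e = e+1
--     return rtn
-- ===== SOURCE B (Python) =====
-- def SplitStringAtPunctuation(astring):
--     return astring.replace("?", ".").replace("!", ".").split(".")[:-1]
-- ===== Notes on version B (the rewrite author's own statement) =====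
-- stated objective: idiomatic
-- what changed: A's manual two-cursor index loop with explicit slicing is replaced by normalising the two other delimiter characters to a period with str.replace and delegating the traversal to str.split, slicing off the trailing piece.
import Mathlib
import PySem

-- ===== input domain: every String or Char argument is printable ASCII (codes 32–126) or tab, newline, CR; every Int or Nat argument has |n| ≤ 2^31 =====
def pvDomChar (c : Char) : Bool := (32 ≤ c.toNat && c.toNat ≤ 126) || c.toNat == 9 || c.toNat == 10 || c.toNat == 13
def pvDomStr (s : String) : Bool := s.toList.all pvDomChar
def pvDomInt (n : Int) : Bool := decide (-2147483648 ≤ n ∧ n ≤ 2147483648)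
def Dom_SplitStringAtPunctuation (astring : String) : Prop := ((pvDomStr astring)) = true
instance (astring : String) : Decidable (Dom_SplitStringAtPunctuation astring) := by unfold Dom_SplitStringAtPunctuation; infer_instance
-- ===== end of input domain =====

-- B replaces A's manual two-cursor index loop by delimiter normalisation via str.replace plus str.split and a
-- [:-1] slice (idiomatic; the trailing piece after the last delimiter is discarded, as A does).

-- ===== PORT A =====
-- A's while loop: fuel = len(astring) bounds the iterations (e grows by 1 each pass, stops at len).
def pvLoopA (astring : String) (s e : Int) (rtn : List String) : Nat → List String
  | 0 => rtn
  | fuel+1 =>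
    if e < PySem.Str.len astring then
      if PySem.Str.isIn (String.ofList [(PySem.Str.pyGet? astring e).getD ' ']) ".?!" = false then
        pvLoopA astring s (e+1) rtn fuel
      else
        pvLoopA astring (e+1) (e+1) (rtn ++ [PySem.Str.slice astring (some s) (some e)]) fuel
    else rtn

def SplitStringAtPunctuation (astring : String) : List String :=
  pvLoopA astring 0 0 [] astring.toList.length

-- ===== PORT B =====
def SplitStringAtPunctuation_alt (astring : String) : List String :=
  PySem.List.slice
    ((PySem.Str.split? (PySem.Str.replace (PySem.Str.replace astring "?" ".") "!" ".") ".").getD [])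
    none (some (-1))

-- ===== PRECONDITION & SPEC =====
def Spec_SplitStringAtPunctuation (astring : String) (out : List String) : Prop := out = SplitStringAtPunctuation_alt astring
instance (astring : String) (out : List String) : Decidable (Spec_SplitStringAtPunctuation astring out) := by unfold Spec_SplitStringAtPunctuation; infer_instance

-- ===== CLAIM (what is proved, stated in full; the proofs are below) =====
def Claim_equal_SplitStringAtPunctuation : Prop := ∀ (astring : String), Dom_SplitStringAtPunctuation astring → Spec_SplitStringAtPunctuation astring (SplitStringAtPunctuation astring)

-- ===== LEMMAS AND PROOFS =====

-- common spec: segments of l relative to predicate p, pre = partial segment already read; the LAST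
-- element of the result is the unterminated trailing piece.
def pvSeg (p : Char → Bool) (pre : List Char) : List Char → List (List Char)
  | [] => [pre]
  | c :: t => if p c then pre :: pvSeg p [] t else pvSeg p (pre ++ [c]) t

def pvPunct (c : Char) : Bool := c == '.' || c == '?' || c == '!'

def pvSubst (c : Char) : Char := if c = '?' then '.' else if c = '!' then '.' else c

lemma pvSeg_ne_nil (p : Char → Bool) (pre : List Char) (l : List Char) : pvSeg p pre l ≠ [] := by
  induction l generalizing pre with
  | nil => simp [pvSeg]
  | cons c t ih => by_cases h : p c <;> simp [pvSeg, h, ih]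

lemma pvReplaceGo_single (o n : Char) : ∀ (l : List Char) (fuel : Nat) (acc : List Char), l.length ≤ fuel →
    PySem.Chars.replace.go [o] [n] fuel l acc = acc.reverse ++ l.map (fun c => if c = o then n else c) := by
  intro l
  induction l with
  | nil => intro fuel acc _; cases fuel <;> simp [PySem.Chars.replace.go]
  | cons c t ih =>
    intro fuel acc hf
    cases fuel with
    | zero => simp at hf
    | succ fuel =>
      by_cases h : o = c
      · subst h
        rw [show PySem.Chars.replace.go [o] [n] (fuel+1) (o :: t) acc
              = PySem.Chars.replace.go [o] [n] fuel t (n :: acc) by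
            simp [PySem.Chars.replace.go, List.isPrefixOf]]
        rw [ih fuel (n :: acc) (by simpa using hf)]
        simp
      · rw [show PySem.Chars.replace.go [o] [n] (fuel+1) (c :: t) acc
              = PySem.Chars.replace.go [o] [n] fuel t (c :: acc) by
            simp [PySem.Chars.replace.go, List.isPrefixOf, h]]
        rw [ih fuel (c :: acc) (by simpa using hf)]
        have h' : ¬ (c = o) := fun hh => h hh.symm
        simp [h']


lemma pvReplace_single (o n : Char) (l : List Char) :
    PySem.Chars.replace l [o] [n] = l.map (fun c => if c = o then n else c) := by
  simp [PySem.Chars.replace, pvReplaceGo_single o n l l.length [] le_rfl]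


lemma pvSplitGo_single (s0 : Char) : ∀ (l : List Char) (fuel : Nat) (cur : List Char) (acc : List (List Char)), l.length ≤ fuel →
    PySem.Chars.splitOn.go [s0] fuel l cur acc = acc.reverse ++ pvSeg (fun c => c == s0) cur.reverse l := by
  intro l
  induction l with
  | nil => intro fuel cur acc _; cases fuel <;> simp [PySem.Chars.splitOn.go, pvSeg]
  | cons c t ih =>
    intro fuel cur acc hf
    cases fuel with
    | zero => simp at hf
    | succ fuel =>
      by_cases h : c = s0
      · subst h
        simp [PySem.Chars.splitOn.go, List.isPrefixOf, pvSeg,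
              ih fuel [] (cur.reverse :: acc) (by simpa using hf)]
      · have h' : ¬ (s0 = c) := fun hh => h hh.symm
        simp [PySem.Chars.splitOn.go, List.isPrefixOf, pvSeg, h, h',
              ih fuel (c :: cur) acc (by simpa using hf)]


lemma pvSplitOn_single (s0 : Char) (l : List Char) :
    PySem.Chars.splitOn l [s0] = pvSeg (fun c => c == s0) [] l := by
  simpa using pvSplitGo_single s0 l (l.length + 1) [] [] (by omega)


lemma pvSeg_map : ∀ (l : List Char) (pre : List Char),
    pvSeg (fun c => c == '.') pre (l.map pvSubst) = pvSeg pvPunct pre l := by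
  intro l
  induction l with
  | nil => intro pre; simp [pvSeg]
  | cons c t ih =>
    intro pre
    by_cases h1 : c = '?'
    · subst h1; simp [pvSeg, pvSubst, pvPunct, ih]
    · by_cases h2 : c = '!'
      · subst h2; simp [pvSeg, pvSubst, pvPunct, ih]
      · by_cases h3 : c = '.'
        · subst h3; simp [pvSeg, pvSubst, pvPunct, ih]
        · simp [pvSeg, pvSubst, pvPunct, h1, h2, h3, ih]


lemma pvSlice_neg_one {α : Type} (xs : List α) : PySem.List.slice xs none (some (-1)) = xs.dropLast := by
  cases xs with
  | nil => simp [PySem.List.slice, PySem.List.clampIdx]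
  | cons x t =>
    have h1 : PySem.List.clampIdx (x::t).length (-1) = t.length := by
      simp [PySem.List.clampIdx]
    simp [PySem.List.slice, List.dropLast_eq_take]


lemma pvSingleton_infix {α : Type} (c : α) (l : List α) : [c] <:+: l ↔ c ∈ l := by
  constructor
  · intro h
    exact h.subset (by simp)
  · intro h
    obtain ⟨l1, l2, rfl⟩ := List.append_of_mem h
    exact ⟨l1, l2, by simp⟩


lemma pvIsIn_punct (c : Char) : PySem.Str.isIn (String.ofList [c]) ".?!" = pvPunct c := by
  have hl : (".?!" : String).toList = ['.', '?', '!'] := by decide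
  have hb : PySem.Str.isIn (String.ofList [c]) ".?!" = PySem.Chars.isIn [c] ['.', '?', '!'] := by
    simp [hl]
  cases h : pvPunct c
  · rw [hb]
    refine (PySem.Chars.isIn_eq_false_iff _ _).mpr ?_
    rw [pvSingleton_infix]
    simp only [pvPunct, Bool.or_eq_false_iff, beq_eq_false_iff_ne, ne_eq] at h
    simp [h.1.1, h.1.2, h.2]
  · rw [hb]
    refine (PySem.Chars.isIn_iff_infix _ _).mpr ?_
    rw [pvSingleton_infix]
    simp only [pvPunct, Bool.or_eq_true, beq_iff_eq] at h
    rcases h with (rfl | rfl) | rfl <;> decide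


lemma pvLoopA_eq (astring : String) : ∀ (fuel : Nat) (s e : Nat) (rtn : List String),
    s ≤ e → e ≤ astring.toList.length → astring.toList.length - e ≤ fuel →
    pvLoopA astring (s : Int) (e : Int) rtn fuel =
      rtn ++ ((pvSeg pvPunct ((astring.toList.drop s).take (e - s)) (astring.toList.drop e)).dropLast).map String.ofList := by
  intro fuel
  induction fuel with
  | zero =>
    intro s e rtn hse hel hf
    have he : e = astring.toList.length := by omega
    subst he
    show rtn = _
    rw [List.drop_length]
    simp [pvSeg]
  | succ fuel ih =>
    intro s e rtn hse hel hf
    by_cases hlt : e < astring.toList.length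
    · have hc : (PySem.Str.pyGet? astring (e : Int)).getD ' ' = astring.toList[e] := by
        simp [List.getElem?_eq_getElem hlt]
      have hcast : ((e : Int) < PySem.Str.len astring) := by
        rw [PySem.Str.len_eq]; exact_mod_cast hlt
      have hdrop : astring.toList.drop e = astring.toList[e] :: astring.toList.drop (e+1) :=
        List.drop_eq_getElem_cons hlt
      have hone : ((e : Int) + 1) = ((e + 1 : Nat) : Int) := by push_cast; ring
      rw [show pvLoopA astring (s : Int) (e : Int) rtn (fuel+1)
            = (if (e : Int) < PySem.Str.len astring then
                (if PySem.Str.isIn (String.ofList [(PySem.Str.pyGet? astring (e:Int)).getD ' ']) ".?!" = false then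
                  pvLoopA astring (s:Int) ((e:Int)+1) rtn fuel
                else
                  pvLoopA astring ((e:Int)+1) ((e:Int)+1) (rtn ++ [PySem.Str.slice astring (some (s:Int)) (some (e:Int))]) fuel)
               else rtn) from rfl,
          if_pos hcast, hc, pvIsIn_punct]
      by_cases hp : pvPunct astring.toList[e]
      · rw [if_neg (by simp [hp])]
        have hslice : PySem.Str.slice astring (some (s:Int)) (some (e:Int))
            = String.ofList ((astring.toList.drop s).take (e - s)) := by
          rw [← String.toList_inj]
          simp [PySem.Str.toList_slice, PySem.List.slice_natCast]
        rw [hone, ih (e+1) (e+1) _ le_rfl (by omega) (by omega)]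
        rw [hdrop]
        simp [pvSeg, hp, hslice, List.dropLast_cons_of_ne_nil (pvSeg_ne_nil _ _ _)]
      · rw [if_pos (by simp [hp])]
        rw [hone, ih s (e+1) rtn (by omega) (by omega) (by omega)]
        have hpre : (astring.toList.drop s).take (e + 1 - s)
            = (astring.toList.drop s).take (e - s) ++ [astring.toList[e]] := by
          have h1 : e + 1 - s = (e - s) + 1 := by omega
          have h2 : (astring.toList.drop s)[e - s]? = some astring.toList[e] := by
            rw [List.getElem?_drop, show s + (e - s) = e from by omega,
                List.getElem?_eq_getElem hlt]
          rw [h1, List.take_add_one, h2]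
          rfl
        rw [hdrop, hpre]
        simp [pvSeg, hp]
    · have he : e = astring.toList.length := by omega
      subst he
      have hcast : ¬ ((astring.toList.length : Int) < PySem.Str.len astring) := by
        simp [PySem.Str.len_eq]
      rw [show pvLoopA astring (s : Int) (astring.toList.length : Int) rtn (fuel+1)
            = (if (astring.toList.length : Int) < PySem.Str.len astring then
                (if PySem.Str.isIn (String.ofList [(PySem.Str.pyGet? astring (astring.toList.length:Int)).getD ' ']) ".?!" = false then
                  pvLoopA astring (s:Int) ((astring.toList.length:Int)+1) rtn fuel
                else
                  pvLoopA astring ((astring.toList.length:Int)+1) ((astring.toList.length:Int)+1)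
                    (rtn ++ [PySem.Str.slice astring (some (s:Int)) (some (astring.toList.length:Int))]) fuel)
               else rtn) from rfl,
          if_neg hcast, List.drop_length]
      simp [pvSeg]


lemma pvAlt_eq (astring : String) :
    SplitStringAtPunctuation_alt astring = ((pvSeg pvPunct [] astring.toList).dropLast).map String.ofList := by
  have hcomp : ((fun c => if c = '!' then '.' else c) ∘ (fun c => if c = '?' then '.' else c)) = pvSubst := by
    funext c
    by_cases h1 : c = '?'
    · simp [h1, pvSubst]
    · by_cases h2 : c = '!' <;> simp [h1, h2, pvSubst, Function.comp]
  have hx : (PySem.Str.replace (PySem.Str.replace astring "?" ".") "!" ".").toList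
      = astring.toList.map pvSubst := by
    rw [PySem.Str.toList_replace, PySem.Str.toList_replace,
        show ("?" : String).toList = ['?'] from by decide,
        show ("!" : String).toList = ['!'] from by decide,
        show ("." : String).toList = ['.'] from by decide,
        pvReplace_single, pvReplace_single, List.map_map, hcomp]
  unfold SplitStringAtPunctuation_alt
  simp only [PySem.Str.split?, PySem.Chars.split?, hx,
    show ("." : String).toList = ['.'] from by decide]
  simp only [List.isEmpty_cons, Bool.false_eq_true, reduceIte, Option.map_some,
    Option.getD_some]
  rw [pvSplitOn_single, pvSeg_map, pvSlice_neg_one, List.map_dropLast]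


-- ===== VERDICT (by name: the statement is the Claim_ definition above) =====
theorem SplitStringAtPunctuation_spec : Claim_equal_SplitStringAtPunctuation := by
  intro astring _
  unfold Spec_SplitStringAtPunctuation SplitStringAtPunctuation
  rw [pvAlt_eq]
  have h := pvLoopA_eq astring astring.toList.length 0 0 [] (by omega) (by omega) (by omega)
  simpa using h
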